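-- pv_equiv track=rewrite | github.com/sebasrosalesr/Laroci | la_zoning_api/zimas_scraper.py | clean_street_name
-- ===== SOURCE A (Python) =====
-- def clean_street_name(name: str) -> str:
--     suffixes = [" st", " street", " ave", " avenue", " blvd", " boulevard",
--                 " dr", " drive", " rd", " road", " pl", " place", " ln", " lane",
--                 " way", " ct", " court", " cir", " circle", " ter", " terrace"]
--     n = name.lower().strip()
--     for s in suffixes:
--         if n.endswith(s):
--             n = n[: -len(s)]
--             break
--     return n.strip().title()
-- ===== SOURCE B (Python) =====
-- _SUFFIXES = frozenset(
--     "st street ave avenue blvd boulevard dr drive rd road pl place "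
--     "ln lane way ct court cir circle ter terrace".split())
--
-- def clean_street_name(name: str) -> str:
--     n = name.lower().strip()
--     parts = n.rsplit(' ', 1)
--     if len(parts) == 2 and parts[1] in _SUFFIXES:
--         n = parts[0].rstrip()
--     return n.title()
-- ===== Notes on version B (the rewrite author's own statement) =====
-- stated objective: idiomatic
-- what changed: Replaces A's ordered scan of 21 space-prefixed endswith tests (with break and a negative-slice cut) by one right-split on the last space plus a single membership test in a frozenset of suffix words built from one split() literal, rstripping the kept head instead of re-stripping the whole string.
import Mathlib
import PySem

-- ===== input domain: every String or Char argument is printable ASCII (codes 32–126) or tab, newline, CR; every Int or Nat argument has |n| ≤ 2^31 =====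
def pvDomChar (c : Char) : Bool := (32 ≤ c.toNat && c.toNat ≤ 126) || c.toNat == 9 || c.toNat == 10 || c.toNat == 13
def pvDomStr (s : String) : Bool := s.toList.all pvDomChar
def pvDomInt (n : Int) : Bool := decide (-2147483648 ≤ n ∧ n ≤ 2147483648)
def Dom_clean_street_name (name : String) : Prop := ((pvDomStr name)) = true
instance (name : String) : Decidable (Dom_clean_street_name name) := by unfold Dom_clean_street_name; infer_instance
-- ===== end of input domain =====

-- B replaces A's ordered scan of 21 " suffix" endswith tests by one right-split at the
-- last space and a single suffix-word set lookup (objective: idiomatic; same result).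

-- hand port of str.title() (PySem has none); exact on the ASCII domain: a letter
-- following a letter is lowercased, any other letter is uppercased, rest unchanged
def pvTitleGo : Bool → List Char → List Char
  | _, [] => []
  | prev, c :: cs =>
      (if PySem.Chars.isalpha c then
        (if prev then PySem.Chars.lowerChar c else PySem.Chars.upperChar c) else c)
        :: pvTitleGo (PySem.Chars.isalpha c) cs

def pvTitle (cs : List Char) : List Char := pvTitleGo false cs

-- ===== PORT A =====
def pvSuffixesA : List (List Char) :=
  [" st".toList, " street".toList, " ave".toList, " avenue".toList, " blvd".toList,
   " boulevard".toList, " dr".toList, " drive".toList, " rd".toList, " road".toList,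
   " pl".toList, " place".toList, " ln".toList, " lane".toList, " way".toList,
   " ct".toList, " court".toList, " cir".toList, " circle".toList, " ter".toList,
   " terrace".toList]

-- A's for-loop with break: first matching suffix is cut with n[:-len(s)]
def pvStripLoop (n : List Char) : List (List Char) → List Char
  | [] => n
  | s :: rest =>
      if PySem.Chars.endswith n s then PySem.List.slice n none (some (-(s.length : Int)))
      else pvStripLoop n rest

def clean_street_name (name : String) : String :=
  let n := PySem.Chars.strip (PySem.Chars.lower name.toList)
  String.ofList (pvTitle (PySem.Chars.strip (pvStripLoop n pvSuffixesA)))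

-- ===== PORT B =====
-- Source B's frozenset("st street … terrace".split())
def pvWordsB : List (List Char) :=
  PySem.Chars.split₀
    ("st street ave avenue blvd boulevard dr drive rd road pl place ln lane way ct court cir circle ter terrace".toList)

-- hand port of s.rsplit(' ', 1) (PySem has no rsplit); exact: split at the LAST space
def pvRsplitSpace1 (cs : List Char) : List (List Char) :=
  let rev := cs.reverse
  if rev.contains ' ' then
    [((rev.dropWhile (· ≠ ' ')).tail).reverse, (rev.takeWhile (· ≠ ' ')).reverse]
  else [cs]

-- hand port of str.title() again, Source B-style: a left fold carrying (prevAlpha, reversed output)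
def pvTitleStep (st : Bool × List Char) (c : Char) : Bool × List Char :=
  (PySem.Chars.isalpha c,
   (if PySem.Chars.isalpha c then
      (if st.1 then PySem.Chars.lowerChar c else PySem.Chars.upperChar c) else c) :: st.2)

def pvTitleB (cs : List Char) : List Char := ((cs.foldl pvTitleStep (false, [])).2).reverse

def clean_street_name_alt (name : String) : String :=
  let n := (PySem.Str.strip (PySem.Str.lower name)).toList
  let parts := pvRsplitSpace1 n
  let n' := if parts.length == 2 && pvWordsB.contains (PySem.List.pyGetD parts 1 []) then
              PySem.Chars.rstrip (parts.headD []) else n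
  String.ofList (pvTitleB n')

-- ===== PRECONDITION & SPEC =====
def Spec_clean_street_name (name : String) (out : String) : Prop := out = clean_street_name_alt name
instance (name : String) (out : String) : Decidable (Spec_clean_street_name name out) := by unfold Spec_clean_street_name; infer_instance

-- ===== CLAIM (what is proved, stated in full; the proofs are below) =====
def Claim_equal_clean_street_name : Prop := ∀ (name : String), Dom_clean_street_name name → Spec_clean_street_name name (clean_street_name name)

-- ===== LEMMAS AND PROOFS =====

-- the two title ports agree: the fold with a reversed accumulator computes pvTitleGo
lemma pvTitleB_go (cs : List Char) : ∀ (prev : Bool) (acc : List Char),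
    ((cs.foldl pvTitleStep (prev, acc)).2).reverse = acc.reverse ++ pvTitleGo prev cs := by
  induction cs with
  | nil => intro prev acc; simp [pvTitleGo]
  | cons c cs ih =>
      intro prev acc
      simp only [List.foldl_cons, pvTitleStep, pvTitleGo, ih, List.reverse_cons,
        List.append_assoc, List.singleton_append]

lemma pvTitleB_eq (cs : List Char) : pvTitleB cs = pvTitle cs := by
  unfold pvTitleB pvTitle
  simpa using pvTitleB_go cs false []

lemma pv_dropWhile_idem (p : Char → Bool) (l : List Char) :
    (l.dropWhile p).dropWhile p = l.dropWhile p := by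
  induction l with
  | nil => rfl
  | cons a l ih =>
      rw [List.dropWhile_cons]
      split
      · exact ih
      · rw [List.dropWhile_cons]; simp_all

-- a prefix of a left-stripped list is left-stripped
lemma pv_lstrip_prefix (u y : List Char) (hp : u <+: y) (hy : PySem.Chars.lstrip y = y) :
    PySem.Chars.lstrip u = u := by
  cases u with
  | nil => rfl
  | cons a u' =>
      obtain ⟨t, rfl⟩ := hp
      unfold PySem.Chars.lstrip at *
      rw [List.cons_append, List.dropWhile_cons] at hy
      rw [List.dropWhile_cons]
      split
      · exfalso
        rw [if_pos (by assumption)] at hy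
        have h1 := List.length_dropWhile_le (p := PySem.Chars.isspace) (l := u' ++ t)
        have h2 := congrArg List.length hy
        simp at h1 h2
        omega
      · rfl

lemma pv_rstrip_idem (y : List Char) :
    PySem.Chars.rstrip (PySem.Chars.rstrip y) = PySem.Chars.rstrip y := by
  unfold PySem.Chars.rstrip
  rw [List.reverse_reverse, pv_dropWhile_idem]

lemma pv_lstrip_strip (y : List Char) :
    PySem.Chars.lstrip (PySem.Chars.strip y) = PySem.Chars.strip y := by
  unfold PySem.Chars.strip
  apply pv_lstrip_prefix _ (PySem.Chars.lstrip y)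
  · unfold PySem.Chars.rstrip
    have h : (PySem.Chars.lstrip y).reverse.dropWhile PySem.Chars.isspace <:+
        (PySem.Chars.lstrip y).reverse := List.dropWhile_suffix _
    have := List.reverse_prefix.mpr h
    simpa using this
  · unfold PySem.Chars.lstrip
    exact pv_dropWhile_idem _ _
lemma pv_rstrip_strip (y : List Char) :
    PySem.Chars.rstrip (PySem.Chars.strip y) = PySem.Chars.strip y := by
  unfold PySem.Chars.strip
  exact pv_rstrip_idem _

-- a space-free block followed by ' ' is a prefix of (space-free T) ++ ' ' :: R iff it is T ++ [' ']
lemma pv_prefix_spacefree (u : List Char) : ∀ (T R : List Char), ' ' ∉ u → ' ' ∉ T →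
    (u ++ [' '] <+: T ++ ' ' :: R ↔ u = T) := by
  induction u with
  | nil =>
      intro T R _ hT
      cases T with
      | nil => simp
      | cons b T' =>
          simp only [List.nil_append, List.cons_append]
          constructor
          · rintro h
            rcases List.cons_prefix_cons.mp h with ⟨hb, -⟩
            exact absurd hb.symm (by intro h'; exact hT (h' ▸ List.mem_cons_self ..))
          · intro h; exact absurd h (by simp)
  | cons a u' ih =>
      intro T R ha hT
      cases T with
      | nil =>
          simp only [List.cons_append, List.nil_append]
          constructor
          · intro h
            rcases List.cons_prefix_cons.mp h with ⟨hb, -⟩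
            exact absurd hb (by intro h'; exact ha (h' ▸ List.mem_cons_self ..))
          · intro h; exact absurd h (by simp)
      | cons b T' =>
          simp only [List.cons_append, List.cons_prefix_cons, List.cons.injEq]
          constructor
          · rintro ⟨hab, h⟩
            exact ⟨hab, (ih T' R (fun hm => ha (List.mem_cons_of_mem _ hm))
              (fun hm => hT (List.mem_cons_of_mem _ hm))).mp h⟩
          · rintro ⟨hab, h⟩
            exact ⟨hab, (ih T' R (fun hm => ha (List.mem_cons_of_mem _ hm))
              (fun hm => hT (List.mem_cons_of_mem _ hm))).mpr h⟩

lemma pv_loop_no_match (cs : List Char) (ss : List (List Char))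
    (h : ∀ s ∈ ss, PySem.Chars.endswith cs s = false) : pvStripLoop cs ss = cs := by
  induction ss with
  | nil => rfl
  | cons s rest ih =>
      simp only [pvStripLoop, h s (List.mem_cons_self ..)]
      exact ih (fun s' hs' => h s' (List.mem_cons_of_mem _ hs'))

lemma pv_loop_char (cs t : List Char) (ss : List (List Char))
    (hform : ∀ s ∈ ss, ∃ w, s = ' ' :: w ∧ ' ' ∉ w)
    (hmatch : ∀ w, ' ' ∉ w → (PySem.Chars.endswith cs (' ' :: w) = true ↔ w = t)) :
    pvStripLoop cs ss =
      if (' ' :: t) ∈ ss then PySem.List.slice cs none (some (-((t.length + 1 : Nat) : Int)))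
      else cs := by
  induction ss with
  | nil => simp [pvStripLoop]
  | cons s rest ih =>
      obtain ⟨w, rfl, hw⟩ := hform s (List.mem_cons_self ..)
      by_cases hwt : w = t
      · subst hwt
        have he : PySem.Chars.endswith cs (' ' :: w) = true := (hmatch w hw).mpr rfl
        simp [pvStripLoop, he, List.mem_cons]
      · have he : PySem.Chars.endswith cs (' ' :: w) = false := by
          cases h : PySem.Chars.endswith cs (' ' :: w)
          · rfl
          · exact absurd ((hmatch w hw).mp h) hwt
        have hne : (' ' :: t) ≠ (' ' :: w) := by
          intro h; exact hwt (by injection h with _ h2; exact h2.symm)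
        rw [pvStripLoop, he]
        simp only [Bool.false_eq_true, if_false]
        rw [ih (fun s' hs' => hform s' (List.mem_cons_of_mem _ hs'))]
        simp [List.mem_cons, hne]

lemma pv_suffixesA_eq : pvSuffixesA = pvWordsB.map (List.cons ' ') := by decide

lemma pv_words_spacefree : ∀ w ∈ pvWordsB, ' ' ∉ w := by decide

-- the middle values agree on a fully stripped list: A's first-match suffix cut then strip
-- equals B's last-word lookup with an rstrip of the kept head
lemma pv_middle_eq (cs : List Char)
    (hl : PySem.Chars.lstrip cs = cs) (hr : PySem.Chars.rstrip cs = cs) :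
    PySem.Chars.strip (pvStripLoop cs pvSuffixesA) =
      (let parts := pvRsplitSpace1 cs
       if parts.length == 2 && pvWordsB.contains (PySem.List.pyGetD parts 1 []) then
         PySem.Chars.rstrip (parts.headD []) else cs) := by
  have hscs : PySem.Chars.strip cs = cs := by
    unfold PySem.Chars.strip; rw [hl, hr]
  by_cases hsp : ' ' ∈ cs
  · -- cs has a space: decompose at the LAST space
    have hsp' : ' ' ∈ cs.reverse := List.mem_reverse.mpr hsp
    set T := cs.reverse.takeWhile (· ≠ ' ') with hT
    have hTfree : ' ' ∉ T := by
      intro hm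
      have := List.mem_takeWhile_imp hm
      simp at this
    have hdne : cs.reverse.dropWhile (· ≠ ' ') ≠ [] := by
      intro h
      have := List.dropWhile_eq_nil_iff.mp h ' ' hsp'
      simp at this
    set R := (cs.reverse.dropWhile (· ≠ ' ')).tail with hR
    have hdecomp : cs.reverse = T ++ ' ' :: R := by
      have hhead : (cs.reverse.dropWhile (· ≠ ' ')).head hdne = ' ' := by
        have := List.head_dropWhile_not (fun c => decide (c ≠ ' ')) hdne
        simpa using this
      have := List.takeWhile_append_dropWhile (p := fun c => decide (c ≠ ' ')) (l := cs.reverse)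
      rw [← this, ← hT]
      congr 1
      conv_lhs => rw [← List.cons_head_tail hdne]
      rw [hhead]
    have hcs : cs = R.reverse ++ ' ' :: T.reverse := by
      have : cs = cs.reverse.reverse := (List.reverse_reverse cs).symm
      rw [this, hdecomp]
      simp
    have hmatch : ∀ w, ' ' ∉ w →
        (PySem.Chars.endswith cs (' ' :: w) = true ↔ w = T.reverse) := by
      intro w hwfree
      rw [PySem.Chars.endswith_iff]
      constructor
      · intro h
        have hp : (' ' :: w).reverse <+: cs.reverse := List.reverse_prefix.mpr h
        rw [hdecomp] at hp
        simp only [List.reverse_cons] at hp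
        have := (pv_prefix_spacefree w.reverse T R
          (by simpa using hwfree) hTfree).mp hp
        rw [← this]; simp
      · rintro rfl
        rw [hcs]
        exact (List.suffix_append _ _)
    rw [pv_loop_char cs T.reverse pvSuffixesA
      (by
        intro s hs
        rw [pv_suffixesA_eq] at hs
        rcases List.mem_map.mp hs with ⟨w, hw, rfl⟩
        exact ⟨w, rfl, pv_words_spacefree w hw⟩)
      hmatch]
    have hrsplit : pvRsplitSpace1 cs = [R.reverse, T.reverse] := by
      unfold pvRsplitSpace1
      rw [if_pos (by simpa [List.contains_iff_mem] using hsp'), ← hT, ← hR]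
    rw [hrsplit]
    by_cases hin : T.reverse ∈ pvWordsB
    · have hinA : (' ' :: T.reverse) ∈ pvSuffixesA := by
        rw [pv_suffixesA_eq]
        exact List.mem_map.mpr ⟨T.reverse, hin, rfl⟩
      rw [if_pos hinA]
      have hcont : pvWordsB.contains T.reverse = true := List.contains_iff_mem.mpr hin
      have hslice : PySem.List.slice cs none (some (-((T.reverse.length + 1 : Nat) : Int)))
          = R.reverse := by
        rw [PySem.List.slice_to_neg_natCast cs (T.reverse.length + 1) (Nat.succ_pos _)]
        rw [hcs]
        have hlen : (R.reverse ++ ' ' :: T.reverse).length - (T.reverse.length + 1)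
            = R.reverse.length := by simp
        rw [hlen, List.take_left]
      rw [hslice]
      have hpre : R.reverse <+: cs := ⟨' ' :: T.reverse, hcs.symm⟩
      have hlR : PySem.Chars.lstrip R.reverse = R.reverse := pv_lstrip_prefix _ cs hpre hl
      have hstrip : PySem.Chars.strip R.reverse = PySem.Chars.rstrip R.reverse := by
        unfold PySem.Chars.strip; rw [hlR]
      rw [hstrip]
      have hg : PySem.List.pyGetD [R.reverse, T.reverse] (1 : Int) ([] : List Char)
          = T.reverse := by
        simp [PySem.List.pyGetD, PySem.List.pyGet?, PySem.List.pyIdx?]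
      simp only [hg, hcont, List.length_cons, List.length_nil]
      simp
    · have hinA : (' ' :: T.reverse) ∉ pvSuffixesA := by
        rw [pv_suffixesA_eq]
        intro h
        rcases List.mem_map.mp h with ⟨w, hw, heq⟩
        injection heq with _ h2
        exact hin (h2 ▸ hw)
      rw [if_neg hinA, hscs]
      have hcont : pvWordsB.contains T.reverse = false := by
        simp [hin]
      have hg : PySem.List.pyGetD [R.reverse, T.reverse] (1 : Int) ([] : List Char)
          = T.reverse := by
        simp [PySem.List.pyGetD, PySem.List.pyGet?, PySem.List.pyIdx?]
      simp only [hg, hcont, Bool.and_false]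
      simp
  · -- no space in cs: neither side changes anything
    have hnm : ∀ s ∈ pvSuffixesA, PySem.Chars.endswith cs s = false := by
      intro s hs
      cases h : PySem.Chars.endswith cs s
      · rfl
      · exfalso
        have hsuf := (PySem.Chars.endswith_iff cs s).mp h
        have hsp' : ' ' ∈ s := by
          rw [pv_suffixesA_eq] at hs
          rcases List.mem_map.mp hs with ⟨w, _, rfl⟩
          exact List.mem_cons_self ..
        exact hsp (hsuf.subset hsp')
    rw [pv_loop_no_match cs pvSuffixesA hnm, hscs]
    have : pvRsplitSpace1 cs = [cs] := by
      unfold pvRsplitSpace1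
      rw [if_neg]
      simp only [List.contains_iff_mem, List.mem_reverse]
      exact fun h => hsp (by simpa using h)
    rw [this]
    simp

-- ===== VERDICT (by name: the statement is the Claim_ definition above) =====
theorem clean_street_name_spec : Claim_equal_clean_street_name := by
  intro name _
  unfold Spec_clean_street_name clean_street_name clean_street_name_alt
  simp only [PySem.Str.toList_strip, PySem.Str.toList_lower, pvTitleB_eq]
  rw [pv_middle_eq _ (pv_lstrip_strip _) (pv_rstrip_strip _)]
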